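-- pv_equiv track=rewrite | github.com/samarthhegdekalgar/revision | large_list_element.py | get_large_element
-- ===== SOURCE A (Python) =====
-- def get_large_element(list_value):
--     largest_element = 0
--     for outer_value in range(0, len(list_value)):
--         if list_value[outer_value] > largest_element:
--             largest_element = list_value[outer_value]
--         else:
--             continue
--     return largest_element
-- ===== SOURCE B (Python) =====
-- def get_large_element(list_value):
--     return sorted(list_value + [0])[-1]
-- ===== Notes on version B (the rewrite author's own statement) =====
-- stated objective: alternative
-- what changed: Replaces the index-loop max-tracking scan with a sort of the list plus a 0 sentinel and picking the last element.
import Mathlib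
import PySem

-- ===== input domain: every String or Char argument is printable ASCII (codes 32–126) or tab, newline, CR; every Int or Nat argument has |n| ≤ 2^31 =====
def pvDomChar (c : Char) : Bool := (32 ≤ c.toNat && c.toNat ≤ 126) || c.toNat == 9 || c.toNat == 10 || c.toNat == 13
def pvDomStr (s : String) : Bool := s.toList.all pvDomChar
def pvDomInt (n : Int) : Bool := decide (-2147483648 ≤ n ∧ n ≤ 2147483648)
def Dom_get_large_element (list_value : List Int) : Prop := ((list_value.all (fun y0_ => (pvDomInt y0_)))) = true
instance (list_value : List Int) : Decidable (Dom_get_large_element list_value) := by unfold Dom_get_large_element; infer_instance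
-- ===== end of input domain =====

-- B replaces A's index-loop max-tracking scan by sorting list_value + [0] and taking the last
-- element (alternative decomposition, not faster).

-- ===== PORT A =====
-- the loop index is always in range, so pyGetD's default 0 is never used
def get_large_element (list_value : List Int) : Int :=
  (PySem.List.pyRange 0 (list_value.length : Int) 1).foldl
    (fun largest_element outer_value =>
      if PySem.List.pyGetD list_value outer_value 0 > largest_element then
        PySem.List.pyGetD list_value outer_value 0
      else largest_element) 0

-- ===== PORT B =====
-- sorted(list_value + [0])[-1]; the sorted list is nonempty, so [-1] is its last element
def get_large_element_alt (list_value : List Int) : Int :=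
  (PySem.List.sorted (list_value ++ [0]) (fun x => x) false).getLastD 0

-- ===== PRECONDITION & SPEC =====
def Spec_get_large_element (list_value : List Int) (out : Int) : Prop := out = get_large_element_alt list_value
instance (list_value : List Int) (out : Int) : Decidable (Spec_get_large_element list_value out) := by unfold Spec_get_large_element; infer_instance

-- ===== CLAIM (what is proved, stated in full; the proofs are below) =====
def Claim_equal_get_large_element : Prop := ∀ (list_value : List Int), Dom_get_large_element list_value → Spec_get_large_element list_value (get_large_element list_value)

-- ===== LEMMAS AND PROOFS =====

-- A's loop is a foldl of max over the list
theorem get_large_element_eq_foldl_max (lv : List Int) :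
    get_large_element lv = lv.foldl max 0 := by
  unfold get_large_element
  rw [PySem.List.foldl_pyRange_zero_pyGetD' lv 0
    (fun largest v => if v > largest then v else largest) 0]
  have h : (fun (largest v : Int) => if v > largest then v else largest) = max := by
    funext a v
    simp only [max_def]
    split_ifs <;> omega
  rw [h]

theorem foldl_max_le (lv : List Int) (a : Int) :
    a ≤ lv.foldl max a ∧ ∀ y ∈ lv, y ≤ lv.foldl max a :=
  PySem.List.le_foldl_max lv a

theorem foldl_max_mem (lv : List Int) (a : Int) :
    lv.foldl max a = a ∨ lv.foldl max a ∈ lv := by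
  induction lv generalizing a with
  | nil => left; rfl
  | cons x t ih =>
    rcases ih (max a x) with h | h
    · rw [List.foldl_cons, h]
      rcases max_choice a x with h' | h'
      · left; exact h'
      · right; rw [h']; exact List.mem_cons_self
    · right; exact List.mem_cons_of_mem _ h

theorem getLastD_mem_cons (t : List Int) (a : Int) : t.getLastD a ∈ a :: t := by
  induction t generalizing a with
  | nil => exact List.mem_cons_self
  | cons b t' ih =>
    rw [List.getLastD_cons]
    rcases List.mem_cons.mp (ih b) with h | h
    · rw [h]; exact List.mem_cons_of_mem _ List.mem_cons_self
    · exact List.mem_cons_of_mem _ (List.mem_cons_of_mem _ h)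

theorem le_getLastD (l : List Int) (d : Int) (hd : ∀ y ∈ l, d ≤ y)
    (hp : l.Pairwise (· ≤ ·)) : ∀ x ∈ d :: l, x ≤ l.getLastD d := by
  induction l generalizing d with
  | nil =>
    intro x hx
    rcases List.mem_cons.mp hx with h | h
    · simp [h]
    · cases h
  | cons a t ih =>
    have hda : d ≤ a := hd a List.mem_cons_self
    rcases List.pairwise_cons.mp hp with ⟨hat, hpt⟩
    have iht := ih a hat hpt
    intro x hx
    rw [List.getLastD_cons]
    rcases List.mem_cons.mp hx with h | h
    · subst h
      exact le_trans hda (iht a List.mem_cons_self)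
    · exact iht x h

-- B picks the maximum of list_value ++ [0]
theorem getLastD_mem (l : List Int) (d : Int) (h : l ≠ []) : l.getLastD d ∈ l := by
  cases l with
  | nil => contradiction
  | cons a t =>
    rw [List.getLastD_cons]
    exact getLastD_mem_cons t a

theorem pairwise_le_getLastD (l : List Int) (d : Int) (hp : l.Pairwise (· ≤ ·)) :
    ∀ x ∈ l, x ≤ l.getLastD d := by
  cases l with
  | nil => intro x hx; cases hx
  | cons a t =>
    intro x hx
    rcases List.pairwise_cons.mp hp with ⟨hat, hpt⟩
    rw [List.getLastD_cons]
    exact le_getLastD t a hat hpt x hx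

theorem get_large_element_alt_mem (lv : List Int) :
    get_large_element_alt lv ∈ lv ++ [0] := by
  unfold get_large_element_alt
  have hperm := PySem.List.sorted_perm (lv ++ [0]) (fun x : Int => x) false
  have hne : PySem.List.sorted (lv ++ [0]) (fun x => x) false ≠ [] := by
    intro h
    have hlen := hperm.length_eq
    rw [h] at hlen
    simp at hlen
  exact hperm.mem_iff.mp (getLastD_mem _ 0 hne)

theorem get_large_element_alt_isMax (lv : List Int) :
    ∀ x ∈ lv ++ [0], x ≤ get_large_element_alt lv := by
  unfold get_large_element_alt
  have hperm := PySem.List.sorted_perm (lv ++ [0]) (fun x : Int => x) false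
  have hpw := PySem.List.sorted_pairwise (lv ++ [0]) (fun x : Int => x)
  intro x hx
  exact pairwise_le_getLastD _ 0 hpw x (hperm.mem_iff.mpr hx)

-- ===== VERDICT (by name: the statement is the Claim_ definition above) =====
theorem get_large_element_spec : Claim_equal_get_large_element := by
  intro lv _
  unfold Spec_get_large_element
  rw [get_large_element_eq_foldl_max]
  obtain ⟨h0, hall⟩ := foldl_max_le lv 0
  have hbmem := get_large_element_alt_mem lv
  have hbmax := get_large_element_alt_isMax lv
  apply le_antisymm
  · -- foldl max 0 lv ≤ B
    rcases foldl_max_mem lv 0 with h | h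
    · rw [h]
      exact hbmax 0 (by simp)
    · exact hbmax _ (List.mem_append_left _ h)
  · -- B ≤ foldl max 0 lv
    rcases List.mem_append.mp hbmem with h | h
    · exact hall _ h
    · simp only [List.mem_singleton] at h
      rw [h]; exact h0
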